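-- pv_equiv track=rewrite | github.com/choijaeh01/sleepfm-repro | scripts/analyze_loo_geometry.py | balanced_partitions
-- ===== SOURCE A (Python) =====
-- from itertools import combinations
--
-- def balanced_partitions(m_count: int) -> list[tuple[tuple[int, ...], tuple[int, ...]]]:
--     if m_count < 4 or m_count % 2 != 0:
--         return []
--
--     indices = tuple(range(m_count))
--     half = m_count // 2
--     partitions: list[tuple[tuple[int, ...], tuple[int, ...]]] = []
--     for group_a in combinations(indices, half):
--         if 0 not in group_a:
--             continue
--         group_b = tuple(idx for idx in indices if idx not in group_a)
--         partitions.append((group_a, group_b))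
--     return partitions
-- ===== SOURCE B (Python) =====
-- def balanced_partitions(m_count: int) -> list[tuple[tuple[int, ...], tuple[int, ...]]]:
--     if m_count < 4 or m_count % 2 != 0:
--         return []
--
--     def split(items: tuple[int, ...], need: int) -> list[tuple[tuple[int, ...], tuple[int, ...]]]:
--         # all ways to split items into (a, b) with len(a) == need, both order-preserving
--         if need == 0:
--             return [((), items)]
--         if not items:
--             return []
--         first, rest = items[0], items[1:]
--         taken = [((first,) + a, b) for a, b in split(rest, need - 1)]
--         skipped = [(a, (first,) + b) for a, b in split(rest, need)]
--         return taken + skipped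
--
--     half = m_count // 2
--     return [((0,) + a, b) for a, b in split(tuple(range(1, m_count)), half - 1)]
-- ===== Notes on version B (the rewrite author's own statement) =====
-- stated objective: alternative
-- what changed: B replaces the combinations-enumerate-then-filter-and-rescan of A by one recursive take-or-skip divide that builds each balanced split (group_a, group_b) simultaneously over the indices above the first, prepending the first index afterwards, so no membership test or complement scan is needed.
import Mathlib
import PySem

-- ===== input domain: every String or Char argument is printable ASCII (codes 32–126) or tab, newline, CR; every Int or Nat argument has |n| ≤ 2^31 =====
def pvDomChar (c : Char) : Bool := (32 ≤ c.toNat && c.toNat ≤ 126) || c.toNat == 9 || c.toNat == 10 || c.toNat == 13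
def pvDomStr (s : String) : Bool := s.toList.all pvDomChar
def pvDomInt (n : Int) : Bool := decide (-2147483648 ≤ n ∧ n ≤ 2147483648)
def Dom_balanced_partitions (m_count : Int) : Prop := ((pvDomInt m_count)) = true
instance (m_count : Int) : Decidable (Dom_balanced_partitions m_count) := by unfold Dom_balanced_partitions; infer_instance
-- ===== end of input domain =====

-- B builds each balanced split (group_a, group_b) simultaneously by one recursive
-- take-or-skip divide over the indices above the first, prepending the first index
-- afterwards, instead of enumerating all size-half combinations, filtering those
-- containing the first index and rescanning for the complement (objective: alternative).

-- ===== PORT A =====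
def balanced_partitions (m_count : Int) : List (List Int × List Int) :=
  if m_count < 4 ∨ PySem.Int.mod m_count 2 ≠ 0 then []
  else
    let indices := PySem.List.pyRange 0 m_count 1
    let half := PySem.Int.floordiv m_count 2
    -- half ≥ 2 here, so half.toNat is exact
    (PySem.List.combinations indices half.toNat).foldl
      (fun partitions group_a =>
        if (0 : Int) ∈ group_a then
          partitions ++ [(group_a, indices.filter (fun idx => idx ∉ group_a))]
        else partitions) []

-- ===== PORT B =====
-- all ways to split items into (a, b) with a of length need, both order-preserving
def pvSplit : List Int → Nat → List (List Int × List Int)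
  | items, 0 => [([], items)]
  | [], _ + 1 => []
  | first :: rest, need + 1 =>
      (pvSplit rest need).map (fun p => (first :: p.1, p.2)) ++
      (pvSplit rest (need + 1)).map (fun p => (p.1, first :: p.2))

def balanced_partitions_alt (m_count : Int) : List (List Int × List Int) :=
  if m_count < 4 ∨ PySem.Int.mod m_count 2 ≠ 0 then []
  else
    let half := PySem.Int.floordiv m_count 2
    (pvSplit (PySem.List.pyRange 1 m_count 1) (half.toNat - 1)).map
      (fun p => ((0 : Int) :: p.1, p.2))

-- ===== PRECONDITION & SPEC =====
def Spec_balanced_partitions (m_count : Int) (out : List (List Int × List Int)) : Prop := out = balanced_partitions_alt m_count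
instance (m_count : Int) (out : List (List Int × List Int)) : Decidable (Spec_balanced_partitions m_count out) := by unfold Spec_balanced_partitions; infer_instance

-- ===== CLAIM (what is proved, stated in full; the proofs are below) =====
def Claim_equal_balanced_partitions : Prop := ∀ (m_count : Int), Dom_balanced_partitions m_count → Spec_balanced_partitions m_count (balanced_partitions m_count)

-- ===== LEMMAS AND PROOFS =====

-- the recursive splitter enumerates exactly the combinations paired with their complements
theorem pvSplit_eq_combinations (items : List Int) (n : Nat) (hnd : items.Nodup) :
    pvSplit items n
      = (PySem.List.combinations items n).map
          (fun c => (c, items.filter (fun x => x ∉ c))) := by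
  induction items generalizing n with
  | nil =>
    cases n with
    | zero => simp [pvSplit, PySem.List.combinations_zero]
    | succ n => simp [pvSplit, PySem.List.combinations_nil_succ]
  | cons x rest ih =>
    have hxr : x ∉ rest := (List.nodup_cons.mp hnd).1
    have hrest : rest.Nodup := (List.nodup_cons.mp hnd).2
    cases n with
    | zero => simp [pvSplit, PySem.List.combinations_zero]
    | succ n =>
      rw [pvSplit, ih _ hrest, ih _ hrest, PySem.List.combinations_cons_succ,
          List.map_append, List.map_map, List.map_map, List.map_map]
      congr 1
      · refine List.map_congr_left ?_
        intro c hc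
        have hx : x ∈ x :: c := List.mem_cons_self
        simp only [Function.comp_apply, List.filter_cons, hx, not_true,
          decide_false, Bool.false_eq_true, if_false]
        refine Prod.ext rfl ?_
        refine (List.filter_congr ?_).symm
        intro i hi
        have hne : i ≠ x := fun h => hxr (h ▸ hi)
        simp [hne]
      · refine List.map_congr_left ?_
        intro c hc
        have hsub : c.Sublist rest := PySem.List.sublist_of_mem_combinations hc
        have hxc : x ∉ c := fun h => hxr (hsub.subset h)
        simp [hxc]

theorem balanced_partitions_main (m : Int) :
    balanced_partitions m = balanced_partitions_alt m := by
  unfold balanced_partitions balanced_partitions_alt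
  by_cases hc : m < 4 ∨ PySem.Int.mod m 2 ≠ 0
  · simp only [if_pos hc]
  · simp only [if_neg hc]
    have h4 : 4 ≤ m := le_of_not_gt (fun h => hc (Or.inl h))
    have h0m : (0 : Int) < m := by omega
    have hdiv : PySem.Int.floordiv m 2 = m / 2 :=
      PySem.Int.floordiv_eq_ediv_of_pos (by norm_num)
    have hk : (PySem.Int.floordiv m 2).toNat
        = ((PySem.Int.floordiv m 2).toNat - 1) + 1 := by
      rw [hdiv]; omega
    set k := (PySem.Int.floordiv m 2).toNat - 1 with hkdef
    have hrest0 : (0 : Int) ∉ PySem.List.pyRange 1 m 1 := by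
      simp [PySem.List.mem_pyRange_one]
    rw [PySem.List.pyRange_one_cons h0m, hk, PySem.List.combinations_cons_succ,
        List.foldl_append]
    simp only [zero_add]
    -- the second chunk (combinations not containing 0) contributes nothing
    have hskip : ∀ (acc : List (List Int × List Int))
        (ga : List Int), ga ∈ PySem.List.combinations (PySem.List.pyRange 1 m 1) (k+1) →
        (if (0 : Int) ∈ ga then
          acc ++ [(ga, ((0 : Int) :: PySem.List.pyRange 1 m 1).filter (fun idx => idx ∉ ga))]
        else acc) = acc := by
      intro acc ga hga
      have : (0 : Int) ∉ ga := fun h0 =>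
        hrest0 ((PySem.List.sublist_of_mem_combinations hga).subset h0)
      simp [this]
    rw [PySem.List.foldl_congr_mem _ _ (fun acc _ => acc) _ hskip, PySem.List.foldl_ignore,
        List.foldl_map]
    -- the first chunk: each group begins with 0 and its complement is rest.filter (∉ c)
    have hfirst : ∀ (acc : List (List Int × List Int)) (c : List Int),
        c ∈ PySem.List.combinations (PySem.List.pyRange 1 m 1) k →
        (if (0 : Int) ∈ (0 : Int) :: c then
          acc ++ [((0 : Int) :: c,
            (((0 : Int) :: PySem.List.pyRange 1 m 1).filter (fun idx => idx ∉ (0 : Int) :: c)))]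
        else acc)
        = acc ++ [((0 : Int) :: c,
            (PySem.List.pyRange 1 m 1).filter (fun idx => idx ∉ c))] := by
      intro acc c hc
      rw [if_pos (List.mem_cons_self)]
      have hfil : ((0 : Int) :: PySem.List.pyRange 1 m 1).filter
            (fun idx => decide (idx ∉ (0 : Int) :: c))
          = (PySem.List.pyRange 1 m 1).filter
            (fun idx => decide (idx ∉ c)) := by
        rw [List.filter_cons]
        simp only [List.mem_cons_self, not_true, decide_false, Bool.false_eq_true, if_false]
        refine List.filter_congr ?_
        intro i hi
        have h1i : 1 ≤ i := ((PySem.List.mem_pyRange_one).mp hi).1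
        have hne : i ≠ 0 := by omega
        simp [hne]
      rw [hfil]
    rw [PySem.List.foldl_congr_mem _ _ _ _ hfirst,
        PySem.List.foldl_append_singleton_eq_map, List.nil_append,
        pvSplit_eq_combinations _ _ (PySem.List.nodup_pyRange_one _ _), List.map_map]
    rfl

-- ===== VERDICT (by name: the statement is the Claim_ definition above) =====
theorem balanced_partitions_spec : Claim_equal_balanced_partitions := by
  intro m _
  exact balanced_partitions_main m
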